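-- pv_equiv track=rewrite | github.com/RamAmireddy/hackerrank | Python3_programs/DP/maxCutsOfRod.py | count_max_no_cuts2
-- ===== SOURCE A (Python) =====
-- def count_max_no_cuts2(n, x, y, z):   #bottom-top method
--     dp = [-1 for i in range(n + 1)]
--     dp[0] = 0
--
--     for i in range(1, n + 1):
--
--         if i - x >= 0 and dp[i - x] >= 0 :
--             dp[i] =  max(dp[i],1 + dp[i - x])
--         if i - y >= 0 and dp[i - y] >= 0:
--             dp[i] = max(dp[i],1 + dp[i - y])
--         if i - z >= 0 and dp[i - z] >= 0:
--             dp[i] = max(dp[i], 1 + dp[i - z])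
--
--
--     return dp[n]
-- ===== SOURCE B (Python) =====
-- def count_max_no_cuts2(n, x, y, z):
--     # Arithmetic enumeration instead of a DP table: sort the usable (>=1) lengths, let p be the
--     # smallest; by an exchange argument (p pieces of a longer length q can be replaced by q >= p
--     # pieces of p without lowering the count) an optimal solution uses each longer length fewer
--     # than p times, so enumerate those few counts and divide the remainder by p.
--     if n < 0 or x < 0 or y < 0 or z < 0:
--         raise ValueError("rod and cut lengths must be nonnegative")
--     ls = sorted(l for l in (x, y, z) if l >= 1)
--     if not ls:
--         return 0 if n == 0 else -1
--     p = ls[0]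
--     best = -1
--
--     def choose(idx, rem, cnt):
--         nonlocal best
--         if idx == len(ls):
--             if rem % p == 0:
--                 t = rem // p + cnt
--                 if t > best:
--                     best = t
--             return
--         l = ls[idx]
--         k = 0
--         while k < p and k * l <= rem:
--             choose(idx + 1, rem - k * l, cnt + k)
--             k += 1
--
--     choose(1, n, 0)
--     return best
-- ===== Notes on version B (the rewrite author's own statement) =====
-- stated objective: faster
-- what changed: Replaces A's O(n) bottom-up DP table by arithmetic enumeration: sort the usable (>=1) lengths, take the minimum p, enumerate counts of the longer lengths (each kept below p by an exchange argument) and divide the remainder by p, so no table indexed by rod length is built at all.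
-- intended difference: When a zero cut-length is listed after a positive length l with 1 <= l <= n, A's zero branch re-reads the dp cell an earlier branch may just have written and can count phantom zero-length cuts (A(5,2,0,3)=3); B ignores zero lengths and returns the intended maximal number of genuine cuts (B(5,2,0,3)=2). — e.g. on count_max_no_cuts2(5, 2, 0, 3): A returns 3, B returns 2
-- outside the precondition, e.g. on count_max_no_cuts2(0, -1, 2, 3): A returns 0, B raises ValueError
import Mathlib
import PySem

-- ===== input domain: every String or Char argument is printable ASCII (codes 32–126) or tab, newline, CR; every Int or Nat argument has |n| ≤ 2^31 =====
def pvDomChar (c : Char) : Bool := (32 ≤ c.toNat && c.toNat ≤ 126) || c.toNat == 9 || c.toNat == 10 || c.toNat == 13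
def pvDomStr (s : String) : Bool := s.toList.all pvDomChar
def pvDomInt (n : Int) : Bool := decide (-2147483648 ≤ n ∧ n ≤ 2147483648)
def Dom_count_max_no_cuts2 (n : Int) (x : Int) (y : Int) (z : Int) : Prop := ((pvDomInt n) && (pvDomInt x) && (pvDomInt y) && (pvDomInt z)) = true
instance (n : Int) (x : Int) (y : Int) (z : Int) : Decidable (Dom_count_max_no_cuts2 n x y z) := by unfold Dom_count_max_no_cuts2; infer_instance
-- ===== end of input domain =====

-- B replaces A's O(n) DP table by arithmetic enumeration: sort the usable (>=1) lengths, let p be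
-- the smallest; by an exchange argument each longer length is used fewer than p times in some
-- optimal solution, so B enumerates those few counts and divides the remainder by p.
-- Pre_ is A's non-raising domain minus the n = 0 inputs with a negative length (A's empty loop
-- returns 0 there; B's input validation raises ValueError). On D_ (a zero length listed after a
-- usable positive one) A's branch order counts phantom zero-length cuts; B returns the intended count.


-- ===== PORT A =====
-- A-side list helpers: Python xs[i] read / xs[i] = v write (exact inside Pre_, where every index is in range)
def pvGet (xs : List Int) (i : Int) : Int := PySem.List.pyGetD xs i (-1)
def pvSet (xs : List Int) (i v : Int) : List Int := PySem.List.pySetD xs i v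

-- dp = [-1]*(n+1); dp[0] = 0
def pvInit (n : Int) : List Int := pvSet (List.replicate (n + 1).toNat (-1)) 0 0

-- one of A's three identical updates: if i-l >= 0 and dp[i-l] >= 0: dp[i] = max(dp[i], 1+dp[i-l])
def astep (i l : Int) (dp : List Int) : List Int :=
  if 0 ≤ i - l ∧ 0 ≤ pvGet dp (i - l) then pvSet dp i (max (pvGet dp i) (1 + pvGet dp (i - l))) else dp

-- body of A's loop over i: the three updates, in source order x, y, z
def stepA (x y z : Int) (dp : List Int) (i : Int) : List Int := astep i z (astep i y (astep i x dp))

def count_max_no_cuts2 (n : Int) (x : Int) (y : Int) (z : Int) : Int :=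
  let dp := pvInit n
  let dp := (PySem.List.pyRange 1 (n + 1) 1).foldl (stepA x y z) dp
  pvGet dp n

-- ===== PORT B =====
-- B's base case: if rem % p == 0: t = rem // p + cnt; if t > best: best = t
def chooseDone (p rem cnt best : Int) : Int :=
  if PySem.Int.mod rem p = 0 then
    (if PySem.Int.floordiv rem p + cnt > best then PySem.Int.floordiv rem p + cnt else best)
  else best

-- B's while loop: k = 0; while k < p and k * l <= rem: choose(idx+1, rem - k*l, cnt + k); k += 1
-- (fuel p.toNat only makes the recursion structural: the guard k < p fails once the fuel is out)
def kloop (p l rem cnt : Int) (f : Int → Int → Int → Int) : Nat → Int → Int → Int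
  | 0, _, best => best
  | fuel + 1, k, best =>
      if k < p ∧ k * l ≤ rem then kloop p l rem cnt f fuel (k + 1) (f (rem - k * l) (cnt + k) best) else best

-- B's recursive choose over the remaining lengths ls[idx:], threading best
def chooseB (p : Int) : List Int → Int → Int → Int → Int
  | [], rem, cnt, best => chooseDone p rem cnt best
  | l :: t, rem, cnt, best => kloop p l rem cnt (fun rem' cnt' b => chooseB p t rem' cnt' b) p.toNat 0 best

def count_max_no_cuts2_alt (n : Int) (x : Int) (y : Int) (z : Int) : Int :=
  -- Python B raises ValueError on this first branch; those inputs lie outside Pre_, the -1 is a placeholder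
  if n < 0 ∨ x < 0 ∨ y < 0 ∨ z < 0 then -1
  else
    let ls := PySem.List.sorted ([x, y, z].filter (fun l => decide (1 ≤ l))) (fun l => l) false
    if ls.isEmpty then (if n = 0 then 0 else -1)
    else chooseB ls.headI ls.tail n 0 (-1)

-- ===== PRECONDITION & SPEC =====
-- Pre_ excludes the inputs where A raises IndexError (n < 0, or n ≥ 1 with a negative length) and
-- the n = 0 inputs with a negative length, where A's empty loop still returns 0 but B's natural
-- input validation raises ValueError.
def Pre_count_max_no_cuts2 (n : Int) (x : Int) (y : Int) (z : Int) : Prop :=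
  0 ≤ n ∧ 0 ≤ x ∧ 0 ≤ y ∧ 0 ≤ z
instance (n : Int) (x : Int) (y : Int) (z : Int) : Decidable (Pre_count_max_no_cuts2 n x y z) := by
  unfold Pre_count_max_no_cuts2; infer_instance

def pvWitness_count_max_no_cuts2 : Int × Int × Int × Int := (7, 2, 3, 5)

-- On inputs where a zero cut-length is listed after a positive length l with 1 ≤ l ≤ n, A's
-- zero branch re-reads the dp cell the earlier branch may just have written and can count phantom
-- zero-length cuts (e.g. A (5,2,0,3) = 3); B ignores zero lengths and returns the intended maximal
-- number of genuine cuts (B (5,2,0,3) = 2).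
def D_count_max_no_cuts2 (n : Int) (x : Int) (y : Int) (z : Int) : Prop :=
  1 ≤ n ∧ 0 ≤ x ∧ 0 ≤ y ∧ 0 ≤ z ∧
    ((y = 0 ∧ 1 ≤ x ∧ x ≤ n) ∨ (z = 0 ∧ ((1 ≤ x ∧ x ≤ n) ∨ (1 ≤ y ∧ y ≤ n))))
instance (n : Int) (x : Int) (y : Int) (z : Int) : Decidable (D_count_max_no_cuts2 n x y z) := by
  unfold D_count_max_no_cuts2; infer_instance

def pvDiffWitness_count_max_no_cuts2 : Int × Int × Int × Int := (5, 2, 0, 3)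
def pvDiffWitnessOut_count_max_no_cuts2 : Int × Int := (3, 2)


def Spec_count_max_no_cuts2 (n : Int) (x : Int) (y : Int) (z : Int) (out : Int) : Prop := ¬ D_count_max_no_cuts2 n x y z → out = count_max_no_cuts2_alt n x y z
instance (n : Int) (x : Int) (y : Int) (z : Int) (out : Int) : Decidable (Spec_count_max_no_cuts2 n x y z out) := by unfold Spec_count_max_no_cuts2; infer_instance

-- ===== CLAIM (what is proved, stated in full; the proofs are below) =====
def Claim_unchanged_count_max_no_cuts2 : Prop := ∀ (n : Int) (x : Int) (y : Int) (z : Int), Dom_count_max_no_cuts2 n x y z → Pre_count_max_no_cuts2 n x y z → Spec_count_max_no_cuts2 n x y z (count_max_no_cuts2 n x y z)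
def Claim_changed_count_max_no_cuts2 : Prop := Dom_count_max_no_cuts2 (pvDiffWitness_count_max_no_cuts2.1) (pvDiffWitness_count_max_no_cuts2.2.1) (pvDiffWitness_count_max_no_cuts2.2.2.1) (pvDiffWitness_count_max_no_cuts2.2.2.2) ∧ Pre_count_max_no_cuts2 (pvDiffWitness_count_max_no_cuts2.1) (pvDiffWitness_count_max_no_cuts2.2.1) (pvDiffWitness_count_max_no_cuts2.2.2.1) (pvDiffWitness_count_max_no_cuts2.2.2.2) ∧ D_count_max_no_cuts2 (pvDiffWitness_count_max_no_cuts2.1) (pvDiffWitness_count_max_no_cuts2.2.1) (pvDiffWitness_count_max_no_cuts2.2.2.1) (pvDiffWitness_count_max_no_cuts2.2.2.2) ∧ count_max_no_cuts2 (pvDiffWitness_count_max_no_cuts2.1) (pvDiffWitness_count_max_no_cuts2.2.1) (pvDiffWitness_count_max_no_cuts2.2.2.1) (pvDiffWitness_count_max_no_cuts2.2.2.2) = pvDiffWitnessOut_count_max_no_cuts2.1 ∧ count_max_no_cuts2_alt (pvDiffWitness_count_max_no_cuts2.1) (pvDiffWitness_count_max_no_cuts2.2.1) (pvDiffWitness_count_max_no_cuts2.2.2.1)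 (pvDiffWitness_count_max_no_cuts2.2.2.2) = pvDiffWitnessOut_count_max_no_cuts2.2 ∧ pvDiffWitnessOut_count_max_no_cuts2.1 ≠ pvDiffWitnessOut_count_max_no_cuts2.2

-- ===== LEMMAS AND PROOFS =====

-- the common mathematical value: max number of cuts of i into parts from {x,y,z} (−1 if impossible)
def cstep (i : Nat) (l v acc : Int) : Int :=
  if 1 ≤ l ∧ l ≤ (i : Int) ∧ 0 ≤ v then max acc (1 + v) else acc

def mspec (x y z : Int) (i : Nat) : Int :=
  if h0 : i = 0 then 0
  else
    cstep i z (if h : 1 ≤ z then mspec x y z ((i : Int) - z).toNat else -1)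
      (cstep i y (if h : 1 ≤ y then mspec x y z ((i : Int) - y).toNat else -1)
        (cstep i x (if h : 1 ≤ x then mspec x y z ((i : Int) - x).toNat else -1) (-1)))
termination_by i
decreasing_by all_goals omega

lemma mspec_zero (x y z : Int) : mspec x y z 0 = 0 := by rw [mspec]; rfl

lemma cstep_v (i : Nat) (l v w acc : Int) (h : 1 ≤ l → v = w) : cstep i l v acc = cstep i l w acc := by
  by_cases hl : 1 ≤ l
  · rw [h hl]
  · unfold cstep
    rw [if_neg (fun hc => hl hc.1), if_neg (fun hc => hl hc.1)]

lemma mspec_eq (x y z : Int) (i : Nat) (h0 : i ≠ 0) :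
    mspec x y z i =
      cstep i z (mspec x y z ((i : Int) - z).toNat)
        (cstep i y (mspec x y z ((i : Int) - y).toNat)
          (cstep i x (mspec x y z ((i : Int) - x).toNat) (-1))) := by
  rw [mspec, dif_neg h0]
  rw [cstep_v i x _ (mspec x y z ((i : Int) - x).toNat) (-1) (fun h => dif_pos h)]
  rw [cstep_v i y _ (mspec x y z ((i : Int) - y).toNat) _ (fun h => dif_pos h)]
  rw [cstep_v i z _ (mspec x y z ((i : Int) - z).toNat) _ (fun h => dif_pos h)]

-- partial pull value: like mspec but only sources strictly below k are visible
def pstep (k j : Nat) (l v acc : Int) : Int :=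
  if 1 ≤ l ∧ l ≤ (j : Int) ∧ (j : Int) - l < (k : Int) ∧ 0 ≤ v then max acc (1 + v) else acc

def pfold (x y z : Int) (k j : Nat) : Int :=
  pstep k j z (mspec x y z ((j : Int) - z).toNat)
    (pstep k j y (mspec x y z ((j : Int) - y).toNat)
      (pstep k j x (mspec x y z ((j : Int) - x).toNat) (-1)))

-- the effective candidate contributed by length l
def pE (x y z : Int) (k j : Nat) (l : Int) : Int :=
  if 1 ≤ l ∧ l ≤ (j : Int) ∧ (j : Int) - l < (k : Int) ∧ 0 ≤ mspec x y z ((j : Int) - l).toNat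
  then 1 + mspec x y z ((j : Int) - l).toNat else -1

lemma pstep_as_max (k j : Nat) (l v acc : Int) (h : -1 ≤ acc) :
    pstep k j l v acc = max acc (if 1 ≤ l ∧ l ≤ (j : Int) ∧ (j : Int) - l < (k : Int) ∧ 0 ≤ v then 1 + v else -1) := by
  unfold pstep; split_ifs
  · rfl
  · exact (max_eq_left h).symm

lemma pfold_as_max (x y z : Int) (k j : Nat) :
    pfold x y z k j = max (max (max (-1) (pE x y z k j x)) (pE x y z k j y)) (pE x y z k j z) := by
  unfold pfold pE
  rw [pstep_as_max k j x _ _ (le_refl _)]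
  rw [pstep_as_max k j y _ _ (le_max_left _ _)]
  rw [pstep_as_max k j z _ _ (le_trans (le_max_left _ _) (le_max_left _ _))]

lemma pstep_eq_cstep (k j : Nat) (hk : j ≤ k) (l v acc : Int) : pstep k j l v acc = cstep j l v acc := by
  unfold pstep cstep; split_ifs <;> first | rfl | omega

lemma pull_full (x y z : Int) (k j : Nat) (h0 : j ≠ 0) (hk : j ≤ k) :
    pfold x y z k j = mspec x y z j := by
  unfold pfold
  rw [mspec_eq x y z j h0]
  simp only [pstep_eq_cstep k j hk]

-- mspec as an explicit max of the three candidates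
lemma mspec_as_max (x y z : Int) (i : Nat) (h0 : i ≠ 0) :
    mspec x y z i = max (max (max (-1) (pE x y z i i x)) (pE x y z i i y)) (pE x y z i i z) := by
  rw [← pull_full x y z i i h0 (le_refl i), pfold_as_max]

lemma mspec_ge_neg_one (x y z : Int) (i : Nat) : -1 ≤ mspec x y z i := by
  by_cases h0 : i = 0
  · rw [h0, mspec_zero]; omega
  · rw [mspec_as_max x y z i h0]
    exact le_trans (le_trans (le_max_left _ _) (le_max_left _ _)) (le_max_left _ _)

-- list plumbing for A ----------------------------------------------------

lemma pv_get_set (xs : List Int) (i j v : Int) (hi0 : 0 ≤ i)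
    (hj0 : 0 ≤ j) (hj : j < (xs.length : Int)) :
    pvGet (pvSet xs i v) j = if j = i then v else pvGet xs j := by
  unfold pvGet pvSet
  rw [PySem.List.pySetD_of_nonneg _ _ hi0]
  rw [PySem.List.pyGetD_eq_getElem _ _ hj0 (by simpa using hj)]
  rw [PySem.List.pyGetD_eq_getElem _ _ hj0 hj]
  rw [List.getElem_set]
  split_ifs with h1 h2 h3 <;> first | rfl | omega

lemma length_pvSet (xs : List Int) (i v : Int) : (pvSet xs i v).length = xs.length := by
  simp [pvSet]

lemma pvInit_length (n : Int) : (pvInit n).length = (n + 1).toNat := by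
  simp [pvInit, length_pvSet]

lemma pvGet_replicate (N : Nat) (j : Nat) (hj : j < N) :
    pvGet (List.replicate N (-1 : Int)) (j : Int) = -1 := by
  unfold pvGet
  rw [PySem.List.pyGetD_eq_getElem _ _ (by omega) (by simp; omega)]
  simp

lemma pvInit_get (n : Int) (hn : 0 ≤ n) (j : Nat) (hj : j ≤ n.toNat) :
    pvGet (pvInit n) (j : Int) = if j = 0 then 0 else -1 := by
  unfold pvInit
  rw [pv_get_set _ _ _ _ (by omega) (by omega) (by simp; omega)]
  split_ifs with h1 h2 h3 <;> first | rfl | omega | skip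
  exact pvGet_replicate _ _ (by omega)

def dpA (n x y z : Int) (k : Nat) : List Int :=
  (PySem.List.pyRange 1 ((k : Int) + 1) 1).foldl (stepA x y z) (pvInit n)

lemma dpA_zero (n x y z : Int) : dpA n x y z 0 = pvInit n := by
  unfold dpA
  rw [show ((0:Nat):Int) + 1 = 1 by norm_num, PySem.List.pyRange_one_eq_nil (le_refl 1)]
  rfl

lemma dpA_succ (n x y z : Int) (k : Nat) :
    dpA n x y z (k + 1) = stepA x y z (dpA n x y z k) ((k : Int) + 1) := by
  unfold dpA
  rw [show (((k:Nat) + 1 : Nat) : Int) + 1 = ((k : Int) + 1) + 1 by push_cast; ring]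
  rw [PySem.List.pyRange_one_succ_right (by omega : (1:Int) ≤ (k : Int) + 1)]
  rw [List.foldl_append]
  rfl

lemma length_astep (i l : Int) (dp : List Int) : (astep i l dp).length = dp.length := by
  unfold astep; split_ifs <;> simp [length_pvSet]

lemma length_stepA (x y z i : Int) (dp : List Int) : (stepA x y z dp i).length = dp.length := by
  unfold stepA; rw [length_astep, length_astep, length_astep]

lemma dpA_length (n x y z : Int) (k : Nat) : (dpA n x y z k).length = (n + 1).toNat := by
  induction k with
  | zero => rw [dpA_zero]; exact pvInit_length n
  | succ k ih => rw [dpA_succ, length_stepA]; exact ih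

-- a non-written cell is unchanged by astep
lemma astep_get_ne (i l j : Int) (dp : List Int) (hi0 : 0 ≤ i)
    (hj0 : 0 ≤ j) (hj : j < (dp.length : Int)) (hne : j ≠ i) :
    pvGet (astep i l dp) j = pvGet dp j := by
  unfold astep
  split_ifs
  · rw [pv_get_set _ _ _ _ hi0 hj0 hj, if_neg hne]
  · rfl

-- the written cell of astep follows one cstep of the pull chain
lemma astep_get_i (x y z n l : Int) (k : Nat) (dp : List Int) (c : Int)
    (hn : 0 ≤ n) (hl : 1 ≤ l ∨ (l = 0 ∧ c = -1)) (hlen : dp.length = (n + 1).toNat) (hk : (k : Int) + 1 ≤ n)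
    (hread : ∀ j' : Nat, j' ≤ k → pvGet dp (j' : Int) = mspec x y z j')
    (hcur : pvGet dp ((k : Int) + 1) = c) :
    pvGet (astep ((k : Int) + 1) l dp) ((k : Int) + 1)
      = cstep (k + 1) l (mspec x y z (((k : Int) + 1 - l).toNat)) c := by
  rcases hl with hl | ⟨hl0, hc1⟩
  case inr =>
    subst hl0
    unfold astep cstep
    rw [sub_zero, hcur, hc1]
    rw [if_neg (fun h => by omega), if_neg (fun h => by omega)]
    rw [hcur, hc1]
  by_cases hc : 0 ≤ (k : Int) + 1 - l
  · have e : (((((k : Int) + 1 - l).toNat) : Nat) : Int) = (k : Int) + 1 - l := by omega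
    have hrd : pvGet dp ((k : Int) + 1 - l) = mspec x y z (((k : Int) + 1 - l).toNat) := by
      rw [← e]; exact hread _ (by omega)
    unfold astep cstep
    rw [hrd, hcur]
    by_cases hm : 0 ≤ mspec x y z (((k : Int) + 1 - l).toNat)
    · rw [if_pos ⟨hc, hm⟩, if_pos ⟨hl, by push_cast; omega, hm⟩]
      rw [pv_get_set _ _ _ _ (by omega) (by omega) (by rw [hlen]; omega), if_pos rfl]
    · rw [if_neg (fun h => hm h.2), if_neg (fun h => hm h.2.2), hcur]
  · unfold astep cstep
    rw [if_neg (fun h => hc h.1), if_neg (fun h => hc (by push_cast at h ⊢; omega)), hcur]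

-- a cstep whose length cannot be used at index i is a no-op
lemma cstep_dead (i : Nat) (l v acc : Int) (hd : ¬ (1 ≤ l ∧ l ≤ (i : Int))) :
    cstep i l v acc = acc := by
  unfold cstep
  rw [if_neg (fun h => hd ⟨h.1, h.2.1⟩)]

lemma dpA_inv (n x y z : Int) (hn : 0 ≤ n) (hx : 0 ≤ x) (hy : 0 ≤ y) (hz : 0 ≤ z)
    (hyx : y = 0 → ¬ (1 ≤ x ∧ x ≤ n)) (hzy : z = 0 → ¬ (1 ≤ x ∧ x ≤ n) ∧ ¬ (1 ≤ y ∧ y ≤ n)) :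
    ∀ k : Nat, (k : Int) ≤ n → ∀ j : Nat, j ≤ n.toNat →
      pvGet (dpA n x y z k) (j : Int) = if j ≤ k then mspec x y z j else -1 := by
  intro k
  induction k with
  | zero =>
    intro _ j hj
    rw [dpA_zero, pvInit_get n hn j hj]
    by_cases h : j = 0
    · subst h
      rw [if_pos rfl, if_pos (le_refl 0), mspec_zero]
    · rw [if_neg h, if_neg (by omega)]
  | succ k ih =>
    intro hk1 j hj
    have hk : (k : Int) ≤ n := by omega
    have ihk := ih hk
    have hlen : (dpA n x y z k).length = (n + 1).toNat := dpA_length n x y z k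
    rw [dpA_succ]
    set dp := dpA n x y z k with hdp
    have hi : ((k : Int) + 1) ≤ n := by omega
    have hread : ∀ j' : Nat, j' ≤ k → pvGet dp (j' : Int) = mspec x y z j' := by
      intro j' hj'
      rw [ihk j' (by omega), if_pos hj']
    by_cases hjk : j = k + 1
    · subst hjk
      have hcur : pvGet dp ((k : Int) + 1) = -1 := by
        have h := ihk (k + 1) (by omega)
        rw [if_neg (by omega)] at h
        rw [show (((k + 1 : Nat)) : Int) = (k : Int) + 1 by push_cast; ring] at h
        exact h
      have hlen1 : (astep ((k:Int)+1) x dp).length = (n + 1).toNat := by rw [length_astep]; exact hlen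
      have hlen2 : (astep ((k:Int)+1) y (astep ((k:Int)+1) x dp)).length = (n + 1).toNat := by
        rw [length_astep]; exact hlen1
      have hread1 : ∀ j' : Nat, j' ≤ k → pvGet (astep ((k:Int)+1) x dp) (j' : Int) = mspec x y z j' := by
        intro j' hj'
        rw [astep_get_ne _ _ _ _ (by omega) (by omega) (by rw [hlen]; omega) (by omega)]
        exact hread j' hj'
      have hread2 : ∀ j' : Nat, j' ≤ k →
          pvGet (astep ((k:Int)+1) y (astep ((k:Int)+1) x dp)) (j' : Int) = mspec x y z j' := by
        intro j' hj'
        rw [astep_get_ne _ _ _ _ (by omega) (by omega) (by rw [hlen1]; omega) (by omega)]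
        exact hread1 j' hj'
      have hox : 1 ≤ x ∨ (x = 0 ∧ (-1 : Int) = -1) := by omega
      have h1 := astep_get_i x y z n x k dp (-1) hn hox hlen hi hread hcur
      have hoy : 1 ≤ y ∨ (y = 0 ∧ cstep (k + 1) x (mspec x y z (((k:Int) + 1 - x).toNat)) (-1) = -1) := by
        by_cases hy1 : 1 ≤ y
        · exact Or.inl hy1
        · have hy0 : y = 0 := by omega
          have hxd := hyx hy0
          refine Or.inr ⟨hy0, cstep_dead _ _ _ _ (fun h => hxd ⟨h.1, by push_cast at h; omega⟩)⟩
      have h2 := astep_get_i x y z n y k (astep ((k:Int)+1) x dp) _ hn hoy hlen1 hi hread1 h1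
      have hoz : 1 ≤ z ∨ (z = 0 ∧ cstep (k + 1) y (mspec x y z (((k:Int) + 1 - y).toNat))
          (cstep (k + 1) x (mspec x y z (((k:Int) + 1 - x).toNat)) (-1)) = -1) := by
        by_cases hz1 : 1 ≤ z
        · exact Or.inl hz1
        · have hz0 : z = 0 := by omega
          obtain ⟨hxd, hyd⟩ := hzy hz0
          refine Or.inr ⟨hz0, ?_⟩
          rw [cstep_dead _ _ _ _ (fun h => hxd ⟨h.1, by push_cast at h; omega⟩)]
          exact cstep_dead _ _ _ _ (fun h => hyd ⟨h.1, by push_cast at h; omega⟩)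
      have h3 := astep_get_i x y z n z k (astep ((k:Int)+1) y (astep ((k:Int)+1) x dp)) _ hn hoz hlen2 hi hread2 h2
      rw [if_pos (le_refl (k+1))]
      rw [show (((k + 1 : Nat)) : Int) = (k : Int) + 1 by push_cast; ring]
      unfold stepA
      rw [h3]
      rw [mspec_eq x y z (k + 1) (by omega)]
      have ecast : ∀ l : Int, ((((k + 1 : Nat) : Nat) : Int) - l).toNat = ((k : Int) + 1 - l).toNat := by
        intro l
        omega
      rw [ecast x, ecast y, ecast z]
    · have hne : (j : Int) ≠ (k : Int) + 1 := by omega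
      unfold stepA
      rw [astep_get_ne _ _ _ _ (by omega) (by omega)
            (by rw [length_astep, length_astep, hlen]; omega) hne]
      rw [astep_get_ne _ _ _ _ (by omega) (by omega) (by rw [length_astep, hlen]; omega) hne]
      rw [astep_get_ne _ _ _ _ (by omega) (by omega) (by rw [hlen]; omega) hne]
      rw [ihk j hj]
      split_ifs <;> first | rfl | omega

-- B-side proof machinery --------------------------------------------------

-- the pure value of B's while loop: max over the enumerated k of g at that k (−1 if none)
def kmax (p l rem cnt : Int) (g : Int → Int → Int) : Nat → Int → Int
  | 0, _ => -1
  | fuel + 1, k =>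
      if k < p ∧ k * l ≤ rem then max (g (rem - k * l) (cnt + k)) (kmax p l rem cnt g fuel (k + 1)) else -1

-- the pure value of chooseB (best stripped off)
def gB (p : Int) : List Int → Int → Int → Int
  | [], rem, cnt => if PySem.Int.mod rem p = 0 then PySem.Int.floordiv rem p + cnt else -1
  | l :: t, rem, cnt => kmax p l rem cnt (fun r c => gB p t r c) p.toNat 0

lemma kloop_eq_max (p l rem cnt : Int) (f : Int → Int → Int → Int) (g : Int → Int → Int)
    (hf : ∀ r c b, -1 ≤ b → f r c b = max b (g r c)) :
    ∀ (m : Nat) (k best : Int), -1 ≤ best →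
      kloop p l rem cnt f m k best = max best (kmax p l rem cnt g m k) := by
  intro m
  induction m with
  | zero =>
    intro k best hb
    exact (max_eq_left hb).symm
  | succ m ih =>
    intro k best hb
    show (if k < p ∧ k * l ≤ rem then _ else best) = max best (if k < p ∧ k * l ≤ rem then _ else -1)
    by_cases hg : k < p ∧ k * l ≤ rem
    · rw [if_pos hg, if_pos hg]
      rw [hf _ _ best hb]
      rw [ih (k + 1) _ (le_trans hb (le_max_left _ _))]
      rw [max_assoc]
    · rw [if_neg hg, if_neg hg]
      exact (max_eq_left hb).symm

lemma chooseB_eq_max (p : Int) :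
    ∀ (t : List Int) (rem cnt best : Int), -1 ≤ best →
      chooseB p t rem cnt best = max best (gB p t rem cnt) := by
  intro t
  induction t with
  | nil =>
    intro rem cnt best hb
    show chooseDone p rem cnt best = _
    unfold chooseDone gB
    split_ifs with h1 h2 <;> omega
  | cons l t ih =>
    intro rem cnt best hb
    show kloop p l rem cnt _ p.toNat 0 best = _
    exact kloop_eq_max p l rem cnt _ _ (fun r c b hb' => ih r c b hb') p.toNat 0 best hb

lemma kmax_cases (p l rem cnt : Int) (g : Int → Int → Int) :
    ∀ (m : Nat) (k : Int),
      kmax p l rem cnt g m k = -1 ∨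
        ∃ k', k ≤ k' ∧ k' < p ∧ k' * l ≤ rem ∧ kmax p l rem cnt g m k = g (rem - k' * l) (cnt + k') := by
  intro m
  induction m with
  | zero =>
    intro k
    exact Or.inl rfl
  | succ m ih =>
    intro k
    show (if k < p ∧ k * l ≤ rem then _ else -1) = -1 ∨
      ∃ k', k ≤ k' ∧ k' < p ∧ k' * l ≤ rem ∧ (if k < p ∧ k * l ≤ rem then _ else -1) = _
    by_cases hg : k < p ∧ k * l ≤ rem
    · rw [if_pos hg]
      rcases max_choice (g (rem - k * l) (cnt + k)) (kmax p l rem cnt g m (k + 1)) with hc | hc <;> rw [hc]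
      · exact Or.inr ⟨k, le_refl _, hg.1, hg.2, rfl⟩
      · rcases ih (k + 1) with h | ⟨k', hk1, hk2, hk3, hk4⟩
        · exact Or.inl h
        · exact Or.inr ⟨k', by omega, hk2, hk3, hk4⟩
    · rw [if_neg hg]
      exact Or.inl rfl

lemma kmax_ge (p l rem cnt : Int) (g : Int → Int → Int) (hl : 1 ≤ l) :
    ∀ (m : Nat) (k k' : Int), (p - k).toNat ≤ m → 0 ≤ k → k ≤ k' → k' < p → k' * l ≤ rem →
      g (rem - k' * l) (cnt + k') ≤ kmax p l rem cnt g m k := by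
  intro m
  induction m with
  | zero =>
    intro k k' hm hk0 hkk hkp hkl
    omega
  | succ m ih =>
    intro k k' hm hk0 hkk hkp hkl
    have hg : k < p ∧ k * l ≤ rem := by
      constructor
      · omega
      · calc k * l ≤ k' * l := mul_le_mul_of_nonneg_right hkk (by omega)
          _ ≤ rem := hkl
    show _ ≤ (if k < p ∧ k * l ≤ rem then _ else -1)
    rw [if_pos hg]
    by_cases he : k = k'
    · subst he
      exact le_max_left _ _
    · exact le_trans (ih (k + 1) k' (by omega) (by omega) (by omega) hkp hkl) (le_max_right _ _)

-- representations: PtL ls rem s = "rem is a sum of parts from ls (each usable part ≥ 1) with s parts"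
def PtL : List Int → Int → Nat → Prop
  | [], rem, s => rem = 0 ∧ s = 0
  | l :: t, rem, s => ∃ (k sk : Nat), (l < 1 → k = 0) ∧ PtL t (rem - (k : Int) * l) sk ∧ s = k + sk

-- bounded representations: every count below p, the remainder a multiple of p
def PtLB (p : Int) : List Int → Int → Nat → Prop
  | [], rem, s => ∃ a : Nat, (a : Int) * p = rem ∧ s = a
  | l :: t, rem, s => ∃ (k sk : Nat), (k : Int) < p ∧ (k : Int) * l ≤ rem ∧ PtLB p t (rem - (k : Int) * l) sk ∧ s = k + sk

lemma PtL_perm : ∀ {l1 l2 : List Int}, l1.Perm l2 → ∀ rem s, PtL l1 rem s ↔ PtL l2 rem s := by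
  intro l1 l2 hp
  induction hp with
  | nil => intro rem s; exact Iff.rfl
  | cons a h ih =>
    intro rem s
    unfold PtL
    constructor
    · rintro ⟨k, sk, hd, hP, hs⟩
      exact ⟨k, sk, hd, (ih _ _).mp hP, hs⟩
    · rintro ⟨k, sk, hd, hP, hs⟩
      exact ⟨k, sk, hd, (ih _ _).mpr hP, hs⟩
  | swap a b t =>
    intro rem s
    unfold PtL
    constructor
    · rintro ⟨k1, s1, hd1, ⟨k2, s2, hd2, hP, hs2⟩, hs1⟩
      refine ⟨k2, k1 + s2, hd2, ⟨k1, s2, hd1, ?_, rfl⟩, by omega⟩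
      rw [show rem - (k2 : Int) * a - (k1 : Int) * b = rem - (k1 : Int) * b - (k2 : Int) * a by ring]
      exact hP
    · rintro ⟨k1, s1, hd1, ⟨k2, s2, hd2, hP, hs2⟩, hs1⟩
      refine ⟨k2, k1 + s2, hd2, ⟨k1, s2, hd1, ?_, rfl⟩, by omega⟩
      rw [show rem - (k2 : Int) * b - (k1 : Int) * a = rem - (k1 : Int) * a - (k2 : Int) * b by ring]
      exact hP
  | trans h1 h2 ih1 ih2 =>
    intro rem s
    exact (ih1 rem s).trans (ih2 rem s)

lemma PtL_filter : ∀ (ls : List Int) (rem : Int) (s : Nat),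
    PtL ls rem s ↔ PtL (ls.filter (fun l => decide (1 ≤ l))) rem s := by
  intro ls
  induction ls with
  | nil => intro rem s; exact Iff.rfl
  | cons l t ih =>
    intro rem s
    by_cases hl : 1 ≤ l
    · rw [List.filter_cons_of_pos (by simpa using hl)]
      unfold PtL
      constructor
      · rintro ⟨k, sk, hd, hP, hs⟩
        exact ⟨k, sk, hd, (ih _ _).mp hP, hs⟩
      · rintro ⟨k, sk, hd, hP, hs⟩
        exact ⟨k, sk, hd, (ih _ _).mpr hP, hs⟩
    · rw [List.filter_cons_of_neg (by simpa using hl)]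
      constructor
      · rintro ⟨k, sk, hd, hP, hs⟩
        have hk0 : k = 0 := hd (by omega)
        subst hk0
        rw [Nat.cast_zero, zero_mul, sub_zero] at hP
        have hssk : s = sk := by omega
        rw [hssk]
        exact (ih _ _).mp hP
      · intro hP
        exact ⟨0, s, fun _ => rfl, by rw [Nat.cast_zero, zero_mul, sub_zero]; exact (ih _ _).mpr hP, by omega⟩

lemma PtLB_nonneg (p : Int) (hp : 1 ≤ p) :
    ∀ (t : List Int) (rem : Int) (s : Nat), (∀ l ∈ t, 1 ≤ l) → PtLB p t rem s → 0 ≤ rem := by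
  intro t
  induction t with
  | nil =>
    rintro rem s _ ⟨a, ha, hs⟩
    have : 0 ≤ (a : Int) * p := by positivity
    omega
  | cons l t ih =>
    rintro rem s hmem ⟨k, sk, hkp, hkl, hP, hs⟩
    have h1 := ih _ _ (fun l' hl' => hmem l' (List.mem_cons_of_mem _ hl')) hP
    have hl : 1 ≤ l := hmem l List.mem_cons_self
    have : 0 ≤ (k : Int) * l := by positivity
    omega

lemma PtLB_shift (p : Int) (hp : 1 ≤ p) :
    ∀ (t : List Int) (rem : Int) (s m : Nat),
      PtLB p t rem s → PtLB p t (rem + (m : Int) * p) (s + m) := by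
  intro t
  induction t with
  | nil =>
    rintro rem s m ⟨a, ha, hs⟩
    exact ⟨a + m, by push_cast; rw [← ha]; ring, by omega⟩
  | cons l t ih =>
    rintro rem s m ⟨k, sk, hkp, hkl, hP, hs⟩
    refine ⟨k, sk + m, hkp, ?_, ?_, by omega⟩
    · have : 0 ≤ (m : Int) * p := by positivity
      omega
    · rw [show rem + (m : Int) * p - (k : Int) * l = (rem - (k : Int) * l) + (m : Int) * p by ring]
      exact ih _ _ _ hP

-- bounded representations are representations (with the p-part appended at the end)
lemma PtLB_toPtL (p : Int) (hp : 1 ≤ p) :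
    ∀ (t : List Int) (rem : Int) (s : Nat), (∀ l ∈ t, 1 ≤ l) →
      PtLB p t rem s → PtL (t ++ [p]) rem s := by
  intro t
  induction t with
  | nil =>
    rintro rem s _ ⟨a, ha, hs⟩
    exact ⟨a, 0, fun h => absurd hp (by omega), ⟨by omega, rfl⟩, by omega⟩
  | cons l t ih =>
    rintro rem s hmem ⟨k, sk, hkp, hkl, hP, hs⟩
    exact ⟨k, sk, fun h => absurd (hmem l List.mem_cons_self) (by omega),
      ih _ _ (fun l' hl' => hmem l' (List.mem_cons_of_mem _ hl')) hP, hs⟩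

-- exchange: any representation can be rebalanced so every non-minimal count is below p,
-- without decreasing the number of parts
lemma exchange (p : Int) (hp : 1 ≤ p) :
    ∀ (t : List Int), (∀ l ∈ t, p ≤ l ∧ 1 ≤ l) →
      ∀ (rem : Int) (s : Nat), PtL (t ++ [p]) rem s → ∃ s', s ≤ s' ∧ PtLB p t rem s' := by
  intro t
  induction t with
  | nil =>
    rintro _ rem s ⟨k, sk, hd, ⟨hrem, hsk⟩, hs⟩
    exact ⟨k, by omega, k, by omega, by omega⟩
  | cons l t ih =>
    rintro hmem rem s ⟨k, sk, hd, hP, hs⟩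
    obtain ⟨hpl, hl1⟩ := hmem l List.mem_cons_self
    have hmem' : ∀ l' ∈ t, p ≤ l' ∧ 1 ≤ l' := fun l' hl' => hmem l' (List.mem_cons_of_mem _ hl')
    have hmem1 : ∀ l' ∈ t, 1 ≤ l' := fun l' hl' => (hmem' l' hl').2
    obtain ⟨sk', hsk', hPB⟩ := ih hmem' _ _ hP
    -- reduce k below p by repeatedly moving p copies of l into l copies of p
    have reduce : ∀ (kk : Nat), ∀ (ss : Nat), PtLB p t (rem - (kk : Int) * l) ss →
        ∃ (k'' ss' : Nat), (k'' : Int) < p ∧ PtLB p t (rem - (k'' : Int) * l) ss' ∧ kk + ss ≤ k'' + ss' := by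
      intro kk
      induction kk using Nat.strong_induction_on with
      | _ kk ihk =>
        intro ss hPB'
        by_cases hkp : (kk : Int) < p
        · exact ⟨kk, ss, hkp, hPB', le_refl _⟩
        · have hge : p ≤ (kk : Int) := by omega
          have hkk2 : kk - p.toNat < kk := by omega
          have step : PtLB p t (rem - ((kk - p.toNat : Nat) : Int) * l) (ss + l.toNat) := by
            have := PtLB_shift p hp t (rem - (kk : Int) * l) ss l.toNat hPB'
            have e : rem - (kk : Int) * l + (l.toNat : Int) * p = rem - ((kk - p.toNat : Nat) : Int) * l := by
              have e1 : ((kk - p.toNat : Nat) : Int) = (kk : Int) - p := by omega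
              have e2 : (l.toNat : Int) = l := by omega
              rw [e1, e2]; ring
            rwa [e] at this
          obtain ⟨k'', ss', h1, h2, h3⟩ := ihk (kk - p.toNat) hkk2 (ss + l.toNat) step
          exact ⟨k'', ss', h1, h2, by omega⟩
    obtain ⟨k'', ss', hk''p, hPB'', hle⟩ := reduce k sk' hPB
    have hrem' : 0 ≤ rem - (k'' : Int) * l := PtLB_nonneg p hp t _ _ hmem1 hPB''
    exact ⟨k'' + ss', by omega, ⟨k'', ss', hk''p, by omega, hPB'', rfl⟩⟩

-- soundness: a nonnegative gB value is cnt plus the size of a bounded representation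
lemma gB_sound (p : Int) (hp : 1 ≤ p) :
    ∀ (t : List Int) (rem cnt : Int), 0 ≤ rem →
      gB p t rem cnt = -1 ∨ ∃ s : Nat, PtLB p t rem s ∧ gB p t rem cnt = cnt + s := by
  intro t
  induction t with
  | nil =>
    intro rem cnt hrem
    unfold gB
    split_ifs with hmod
    · right
      rw [PySem.Int.mod_eq_emod_of_pos (by omega : (0:Int) < p)] at hmod
      rw [PySem.Int.floordiv_eq_ediv_of_pos (by omega : (0:Int) < p)]
      have hd : p ∣ rem := Int.dvd_of_emod_eq_zero hmod
      have hq : rem / p * p = rem := Int.ediv_mul_cancel hd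
      have hq0 : 0 ≤ rem / p := Int.ediv_nonneg hrem (by omega)
      refine ⟨(rem / p).toNat, ⟨(rem / p).toNat, ?_, rfl⟩, ?_⟩
      · rw [Int.toNat_of_nonneg hq0]; exact hq
      · rw [Int.toNat_of_nonneg hq0]; ring
    · exact Or.inl rfl
  | cons l t ih =>
    intro rem cnt hrem
    show kmax p l rem cnt (fun r c => gB p t r c) p.toNat 0 = -1 ∨ _
    rcases kmax_cases p l rem cnt (fun r c => gB p t r c) p.toNat 0 with h | ⟨k', hk0, hkp, hkl, hval⟩
    · exact Or.inl h
    · have hrem' : 0 ≤ rem - k' * l := by linarith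
      rcases ih (rem - k' * l) (cnt + k') hrem' with h | ⟨s, hPB, hv⟩
      · exact Or.inl (hval.trans h)
      · right
        refine ⟨k'.toNat + s, ⟨k'.toNat, s, by omega, by rw [Int.toNat_of_nonneg hk0]; exact hkl,
          by rw [Int.toNat_of_nonneg hk0]; exact hPB, rfl⟩, ?_⟩
        show kmax p l rem cnt (fun r c => gB p t r c) p.toNat 0 = _
        rw [hval, hv]
        push_cast
        rw [Int.toNat_of_nonneg hk0]
        ring

-- completeness: gB dominates cnt plus the size of every bounded representation
lemma gB_complete (p : Int) (hp : 1 ≤ p) :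
    ∀ (t : List Int) (rem cnt : Int) (s : Nat), (∀ l ∈ t, 1 ≤ l) →
      PtLB p t rem s → cnt + s ≤ gB p t rem cnt := by
  intro t
  induction t with
  | nil =>
    rintro rem cnt s _ ⟨a, ha, hs⟩
    unfold gB
    have hd : p ∣ rem := ⟨a, by rw [← ha]; ring⟩
    rw [if_pos (by rw [PySem.Int.mod_eq_emod_of_pos (by omega : (0:Int) < p)]; exact Int.emod_eq_zero_of_dvd hd)]
    rw [PySem.Int.floordiv_eq_ediv_of_pos (by omega : (0:Int) < p)]
    have hq : rem / p = a := by rw [← ha]; exact Int.mul_ediv_cancel _ (by omega)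
    rw [hq, hs]
    omega
  | cons l t ih =>
    rintro rem cnt s hmem ⟨k, sk, hkp, hkl, hPB, hs⟩
    have hl : 1 ≤ l := hmem l List.mem_cons_self
    have h1 : (cnt + k) + sk ≤ gB p t (rem - (k : Int) * l) (cnt + k) :=
      ih _ _ _ (fun l' hl' => hmem l' (List.mem_cons_of_mem _ hl')) hPB
    have h2 := kmax_ge p l rem cnt (fun r c => gB p t r c) hl p.toNat 0 (k : Int)
      (by omega) (le_refl _) (by omega) hkp hkl
    show cnt + (s : Int) ≤ kmax p l rem cnt (fun r c => gB p t r c) p.toNat 0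
    calc cnt + (s : Int) = (cnt + k) + sk := by omega
      _ ≤ gB p t (rem - (k : Int) * l) (cnt + k) := h1
      _ ≤ kmax p l rem cnt (fun r c => gB p t r c) p.toNat 0 := h2

-- increment one count of a representation over [x, y, z]
lemma PtL3_incx (x y z r : Int) (s : Nat) (hx : 1 ≤ x) (h : PtL [x, y, z] r s) :
    PtL [x, y, z] (r + x) (s + 1) := by
  simp only [PtL] at h ⊢
  obtain ⟨a, s1, _, ⟨b, s2, hby, ⟨c, s3, hcz, ⟨hrem, h30⟩, hs2⟩, hs1⟩, hs⟩ := h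
  refine ⟨a + 1, s1, fun hc => by omega, ⟨b, s2, hby, ⟨c, s3, hcz, ⟨?_, h30⟩, hs2⟩, hs1⟩, by omega⟩
  push_cast
  linear_combination hrem

lemma PtL3_incy (x y z r : Int) (s : Nat) (hy : 1 ≤ y) (h : PtL [x, y, z] r s) :
    PtL [x, y, z] (r + y) (s + 1) := by
  simp only [PtL] at h ⊢
  obtain ⟨a, s1, hax, ⟨b, s2, _, ⟨c, s3, hcz, ⟨hrem, h30⟩, hs2⟩, hs1⟩, hs⟩ := h
  refine ⟨a, s1 + 1, hax, ⟨b + 1, s2, fun hc => by omega, ⟨c, s3, hcz, ⟨?_, h30⟩, hs2⟩, by omega⟩, by omega⟩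
  push_cast
  linear_combination hrem

lemma PtL3_incz (x y z r : Int) (s : Nat) (hz : 1 ≤ z) (h : PtL [x, y, z] r s) :
    PtL [x, y, z] (r + z) (s + 1) := by
  simp only [PtL] at h ⊢
  obtain ⟨a, s1, hax, ⟨b, s2, hby, ⟨c, s3, _, ⟨hrem, h30⟩, hs2⟩, hs1⟩, hs⟩ := h
  refine ⟨a, s1 + 1, hax, ⟨b, s2 + 1, hby, ⟨c + 1, s3, fun hc => by omega, ⟨?_, h30⟩, by omega⟩, by omega⟩, by omega⟩
  push_cast
  linear_combination hrem

-- L1: every representation size is at most mspec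
lemma PtL_le_mspec (x y z : Int) :
    ∀ (s : Nat) (i : Int), 0 ≤ i → PtL [x, y, z] i s → (s : Int) ≤ mspec x y z i.toNat := by
  intro s
  induction s using Nat.strong_induction_on with
  | _ s ihs =>
    intro i hi hP
    have hP' := hP
    simp only [PtL] at hP'
    obtain ⟨a, s1, hax, ⟨b, s2, hby, ⟨c, s3, hcz, ⟨hrem, h30⟩, hs2⟩, hs1⟩, hs⟩ := hP'
    by_cases hs0 : s = 0
    · have ha0 : a = 0 := by omega
      have hb0 : b = 0 := by omega
      have hc0 : c = 0 := by omega
      subst ha0 hb0 hc0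
      simp only [Nat.cast_zero, zero_mul, sub_zero] at hrem
      have : i = 0 := hrem
      rw [this, hs0]
      simp [mspec_zero]
    · -- some count is positive; a generic step for each of the three lengths
      have main : ∀ l : Int, 1 ≤ l → l ≤ i → PtL [x, y, z] (i - l) (s - 1) →
          (l = x ∨ l = y ∨ l = z) → (s : Int) ≤ mspec x y z i.toNat := by
        intro l hl1 hli hPd hmem
        have hi0 : i.toNat ≠ 0 := by omega
        have ihm : ((s - 1 : Nat) : Int) ≤ mspec x y z (i - l).toNat :=
          ihs (s - 1) (by omega) (i - l) (by omega) hPd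
        have hm0 : 0 ≤ mspec x y z (i - l).toNat := by
          have : ((s - 1 : Nat) : Int) ≥ 0 := by positivity
          omega
        have hcast : (((i.toNat : Nat) : Int) - l).toNat = (i - l).toNat := by omega
        have hguard : 1 ≤ l ∧ l ≤ ((i.toNat : Nat) : Int) ∧ ((i.toNat : Nat) : Int) - l < ((i.toNat : Nat) : Int) ∧
            0 ≤ mspec x y z (((i.toNat : Nat) : Int) - l).toNat := by
          rw [hcast]
          refine ⟨hl1, by omega, by omega, hm0⟩
        have hpe : pE x y z i.toNat i.toNat l = 1 + mspec x y z (i - l).toNat := by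
          unfold pE
          rw [if_pos hguard, hcast]
        have hle : pE x y z i.toNat i.toNat l ≤ mspec x y z i.toNat := by
          rw [mspec_as_max x y z i.toNat hi0]
          rcases hmem with h | h | h <;> subst h
          · exact le_trans (le_trans (le_max_right _ _) (le_max_left _ _)) (le_max_left _ _)
          · exact le_trans (le_max_right _ _) (le_max_left _ _)
          · exact le_max_right _ _
        have hs1' : ((s - 1 : Nat) : Int) = (s : Int) - 1 := by omega
        omega
      rcases Nat.eq_zero_or_pos a with ha | ha
      · rcases Nat.eq_zero_or_pos b with hb | hb
        · -- c > 0, use z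
          have hc : 1 ≤ c := by omega
          have hz1 : 1 ≤ z := by by_contra h; exact absurd (hcz (by omega)) (by omega)
          subst ha hb
          simp only [Nat.cast_zero, zero_mul, sub_zero] at hrem hP
          have hzi : z ≤ i := by
            have : (1 : Int) * z ≤ (c : Int) * z := mul_le_mul_of_nonneg_right (by exact_mod_cast hc) (by omega)
            have hcz' : (c : Int) * z = i := by omega
            omega
          refine main z hz1 hzi ?_ (Or.inr (Or.inr rfl))
          simp only [PtL]
          have e : ((c - 1 : Nat) : Int) = (c : Int) - 1 := by omega
          refine ⟨0, s - 1, fun _ => rfl, ⟨0, s - 1, fun _ => rfl, ⟨c - 1, 0, fun _ => by omega, ⟨?_, rfl⟩, by omega⟩, by omega⟩, by omega⟩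
          push_cast [e]
          linear_combination hrem
        · -- b > 0, use y
          have hy1 : 1 ≤ y := by by_contra h; exact absurd (hby (by omega)) (by omega)
          subst ha
          simp only [Nat.cast_zero, zero_mul, sub_zero] at hrem
          have hnn : 0 ≤ i - (b : Int) * y - (c : Int) * z := by omega
          have hczn : 0 ≤ (c : Int) * z := by
            by_cases hz1 : 1 ≤ z
            · positivity
            · rw [hcz (by omega)]; simp
          have hyi : y ≤ i := by
            have : (1 : Int) * y ≤ (b : Int) * y := mul_le_mul_of_nonneg_right (by exact_mod_cast hb) (by omega)
            omega
          refine main y hy1 hyi ?_ (Or.inr (Or.inl rfl))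
          simp only [PtL]
          have e : ((b - 1 : Nat) : Int) = (b : Int) - 1 := by omega
          refine ⟨0, s - 1, fun _ => rfl, ⟨b - 1, c, fun hc' => by omega, ⟨c, 0, hcz, ⟨?_, rfl⟩, by omega⟩, by omega⟩, by omega⟩
          push_cast [e]
          linear_combination hrem
      · -- a > 0, use x
        have hx1 : 1 ≤ x := by by_contra h; exact absurd (hax (by omega)) (by omega)
        have hnn2 : 0 ≤ i - (a : Int) * x - (b : Int) * y - (c : Int) * z := by omega
        have hbyn : 0 ≤ (b : Int) * y := by
          by_cases hy1 : 1 ≤ y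
          · positivity
          · rw [hby (by omega)]; simp
        have hczn : 0 ≤ (c : Int) * z := by
          by_cases hz1 : 1 ≤ z
          · positivity
          · rw [hcz (by omega)]; simp
        have hxi : x ≤ i := by
          have : (1 : Int) * x ≤ (a : Int) * x := mul_le_mul_of_nonneg_right (by exact_mod_cast ha) (by omega)
          omega
        refine main x hx1 hxi ?_ (Or.inl rfl)
        simp only [PtL]
        have e : ((a - 1 : Nat) : Int) = (a : Int) - 1 := by omega
        refine ⟨a - 1, b + c, fun hc' => by omega, ⟨b, c, hby, ⟨c, 0, hcz, ⟨?_, rfl⟩, by omega⟩, by omega⟩, by omega⟩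
        push_cast [e]
        linear_combination hrem

-- L2: a nonnegative mspec value is attained by a representation
lemma mspec_attain (x y z : Int) :
    ∀ i : Nat, 0 ≤ mspec x y z i → ∃ s : Nat, (s : Int) = mspec x y z i ∧ PtL [x, y, z] (i : Int) s := by
  intro i
  induction i using Nat.strong_induction_on with
  | _ i ihi =>
    intro hM
    by_cases h0 : i = 0
    · subst h0
      refine ⟨0, by simp [mspec_zero], ?_⟩
      simp only [PtL]
      exact ⟨0, 0, fun _ => rfl, ⟨0, 0, fun _ => rfl, ⟨0, 0, fun _ => rfl, ⟨by push_cast; ring, rfl⟩, rfl⟩, rfl⟩, rfl⟩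
    · have hmax := mspec_as_max x y z i h0
      have hone : mspec x y z i = pE x y z i i x ∨ mspec x y z i = pE x y z i i y ∨
          mspec x y z i = pE x y z i i z := by
        rcases max_choice (max (max (-1) (pE x y z i i x)) (pE x y z i i y)) (pE x y z i i z) with h | h
        · rcases max_choice (max (-1) (pE x y z i i x)) (pE x y z i i y) with h2 | h2
          · rcases max_choice (-1 : Int) (pE x y z i i x) with h3 | h3
            · omega
            · exact Or.inl (by omega)
          · exact Or.inr (Or.inl (by omega))
        · exact Or.inr (Or.inr (by omega))
      have main : ∀ l : Int, mspec x y z i = pE x y z i i l →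
          (∀ s : Nat, PtL [x, y, z] ((i : Int) - l) s → PtL [x, y, z] (i : Int) (s + 1)) →
          ∃ s : Nat, (s : Int) = mspec x y z i ∧ PtL [x, y, z] (i : Int) s := by
        intro l hval hinc
        have hpe : 0 ≤ pE x y z i i l := by omega
        unfold pE at hpe hval
        by_cases hg : 1 ≤ l ∧ l ≤ (i : Int) ∧ (i : Int) - l < (i : Int) ∧ 0 ≤ mspec x y z ((i : Int) - l).toNat
        · rw [if_pos hg] at hval
          obtain ⟨hl1, hli, _, hm⟩ := hg
          have hlt : ((i : Int) - l).toNat < i := by omega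
          obtain ⟨s', hs', hP'⟩ := ihi _ hlt hm
          have hcast : ((((i : Int) - l).toNat : Nat) : Int) = (i : Int) - l := by omega
          rw [hcast] at hP'
          exact ⟨s' + 1, by push_cast; omega, hinc s' hP'⟩
        · rw [if_neg hg] at hval
          omega
      rcases hone with h | h | h
      · refine main x h ?_
        intro s hP
        have := PtL3_incx x y z ((i : Int) - x) s (by
          unfold pE at h
          by_cases hg : 1 ≤ x ∧ x ≤ (i : Int) ∧ (i : Int) - x < (i : Int) ∧ 0 ≤ mspec x y z ((i : Int) - x).toNat
          · exact hg.1
          · rw [if_neg hg] at h; omega) hP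
        rwa [sub_add_cancel] at this
      · refine main y h ?_
        intro s hP
        have := PtL3_incy x y z ((i : Int) - y) s (by
          unfold pE at h
          by_cases hg : 1 ≤ y ∧ y ≤ (i : Int) ∧ (i : Int) - y < (i : Int) ∧ 0 ≤ mspec x y z ((i : Int) - y).toNat
          · exact hg.1
          · rw [if_neg hg] at h; omega) hP
        rwa [sub_add_cancel] at this
      · refine main z h ?_
        intro s hP
        have := PtL3_incz x y z ((i : Int) - z) s (by
          unfold pE at h
          by_cases hg : 1 ≤ z ∧ z ≤ (i : Int) ∧ (i : Int) - z < (i : Int) ∧ 0 ≤ mspec x y z ((i : Int) - z).toNat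
          · exact hg.1
          · rw [if_neg hg] at h; omega) hP
        rwa [sub_add_cancel] at this

-- B's result equals mspec for every n ≥ 0 (zero/negative lengths are simply unusable on both sides)
lemma alt_eq_mspec (n x y z : Int) (hn : 0 ≤ n) (hx : 0 ≤ x) (hy : 0 ≤ y) (hz : 0 ≤ z) :
    count_max_no_cuts2_alt n x y z = mspec x y z n.toNat := by
  have hnc : ((n.toNat : Nat) : Int) = n := by omega
  simp only [count_max_no_cuts2_alt]
  rw [if_neg (by omega)]
  rcases hls : PySem.List.sorted ([x, y, z].filter (fun l => decide (1 ≤ l))) (fun l => l) false with _ | ⟨p, rest⟩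
  · -- no usable length
    have hfl : [x, y, z].filter (fun l => decide (1 ≤ l)) = [] := by
      have hperm := PySem.List.sorted_perm ([x, y, z].filter (fun l => decide (1 ≤ l))) (fun l => l) false
      rw [hls] at hperm
      exact List.perm_nil.mp hperm.symm
    simp only [List.isEmpty_nil, if_pos]
    by_cases h0 : n = 0
    · rw [if_pos h0, h0]
      simp [mspec_zero]
    · rw [if_neg h0]
      have hub : ¬ 0 ≤ mspec x y z n.toNat := by
        intro hge
        obtain ⟨s, hs, hP⟩ := mspec_attain x y z n.toNat hge
        rw [hnc] at hP
        have hP2 := (PtL_filter [x, y, z] n s).mp hP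
        rw [hfl] at hP2
        have : n = 0 := hP2.1
        exact h0 this
      have := mspec_ge_neg_one x y z n.toNat
      omega
  · -- p :: rest
    have hperm := PySem.List.sorted_perm ([x, y, z].filter (fun l => decide (1 ≤ l))) (fun l => l) false
    rw [hls] at hperm
    have hmem : ∀ l ∈ (p :: rest), 1 ≤ l := by
      intro l hl
      have := hperm.mem_iff.mp hl
      have := List.of_mem_filter this
      simpa using this
    have hp : 1 ≤ p := hmem p List.mem_cons_self
    have hrest1 : ∀ l ∈ rest, 1 ≤ l := fun l hl => hmem l (List.mem_cons_of_mem _ hl)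
    have hpw := PySem.List.sorted_pairwise ([x, y, z].filter (fun l => decide (1 ≤ l))) (fun l => l)
    rw [hls] at hpw
    have hrestp : ∀ l ∈ rest, p ≤ l := (List.pairwise_cons.mp hpw).1
    simp only [List.isEmpty_cons, List.headI, List.tail]
    rw [if_neg (by simp)]
    rw [chooseB_eq_max p rest n 0 (-1) (le_refl _)]
    -- bridge between bounded representations over (p :: rest) and PtL [x, y, z]
    have toPtL : ∀ s : Nat, PtLB p rest n s → PtL [x, y, z] n s := by
      intro s hPB
      have h1 : PtL (rest ++ [p]) n s := PtLB_toPtL p hp rest n s hrest1 hPB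
      have h2 : PtL (p :: rest) n s := (PtL_perm (List.perm_append_singleton p rest) n s).mp h1
      have h3 : PtL ([x, y, z].filter (fun l => decide (1 ≤ l))) n s := (PtL_perm hperm n s).mp h2
      exact (PtL_filter [x, y, z] n s).mpr h3
    have ofPtL : ∀ s : Nat, PtL [x, y, z] n s → ∃ s' : Nat, s ≤ s' ∧ PtLB p rest n s' := by
      intro s hP
      have h3 : PtL ([x, y, z].filter (fun l => decide (1 ≤ l))) n s := (PtL_filter [x, y, z] n s).mp hP
      have h2 : PtL (p :: rest) n s := (PtL_perm hperm n s).mpr h3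
      have h1 : PtL (rest ++ [p]) n s := (PtL_perm (List.perm_append_singleton p rest) n s).mpr h2
      exact exchange p hp rest (fun l hl => ⟨hrestp l hl, hrest1 l hl⟩) n s h1
    have dir1 : ∀ s : Nat, PtLB p rest n s → (s : Int) ≤ mspec x y z n.toNat := by
      intro s hPB
      have := PtL_le_mspec x y z s n hn (toPtL s hPB)
      exact this
    by_cases hM : 0 ≤ mspec x y z n.toNat
    · obtain ⟨s, hs, hP⟩ := mspec_attain x y z n.toNat hM
      rw [hnc] at hP
      obtain ⟨s', hss', hPB⟩ := ofPtL s hP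
      have hge : (s' : Int) ≤ gB p rest n 0 := by
        have := gB_complete p hp rest n 0 s' hrest1 hPB
        omega
      have hle : gB p rest n 0 ≤ mspec x y z n.toNat := by
        rcases gB_sound p hp rest n 0 hn with h | ⟨s0, hPB0, hv0⟩
        · omega
        · have := dir1 s0 hPB0
          omega
      have : mspec x y z n.toNat ≤ gB p rest n 0 := by
        have : (s : Int) ≤ (s' : Int) := by exact_mod_cast hss'
        omega
      omega
    · have hM1 : mspec x y z n.toNat = -1 := by
        have := mspec_ge_neg_one x y z n.toNat
        omega
      rw [hM1]
      have hle : gB p rest n 0 ≤ -1 := by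
        rcases gB_sound p hp rest n 0 hn with h | ⟨s0, hPB0, hv0⟩
        · omega
        · have := dir1 s0 hPB0
          omega
      omega

-- ===== VERDICT (by name: the statement is the Claim_ definition above) =====
theorem count_max_no_cuts2_spec : Claim_unchanged_count_max_no_cuts2 := by
  unfold Claim_unchanged_count_max_no_cuts2
  intro n x y z _ hpre
  unfold Spec_count_max_no_cuts2
  intro hnd
  unfold D_count_max_no_cuts2 at hnd
  obtain ⟨hn, hx, hy, hz⟩ := hpre
  have hB := alt_eq_mspec n x y z hn hx hy hz
  by_cases h0 : n = 0
  · subst h0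
    have hA : count_max_no_cuts2 0 x y z = pvGet (pvInit 0) 0 := by
      unfold count_max_no_cuts2
      rw [show (0:Int) + 1 = 1 by norm_num, PySem.List.pyRange_one_eq_nil (le_refl 1)]
      rfl
    rw [hA, hB]
    rw [show (0:Int).toNat = 0 from rfl, mspec_zero]
    rfl
  · obtain ⟨m, hm⟩ : ∃ m : Nat, n = (m : Int) := ⟨n.toNat, by omega⟩
    subst hm
    have hyx : y = 0 → ¬ (1 ≤ x ∧ x ≤ (m : Int)) := by
      intro hy0 hxu
      by_cases hm0 : (m : Int) = 0
      · omega
      · exact hnd ⟨by omega, hx, hy, hz, Or.inl ⟨hy0, hxu.1, hxu.2⟩⟩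
    have hzy : z = 0 → ¬ (1 ≤ x ∧ x ≤ (m : Int)) ∧ ¬ (1 ≤ y ∧ y ≤ (m : Int)) := by
      intro hz0
      constructor
      · intro hxu
        exact hnd ⟨by omega, hx, hy, hz, Or.inr ⟨hz0, Or.inl ⟨hxu.1, hxu.2⟩⟩⟩
      · intro hyu
        exact hnd ⟨by omega, hx, hy, hz, Or.inr ⟨hz0, Or.inr ⟨hyu.1, hyu.2⟩⟩⟩
    have hA : count_max_no_cuts2 (m : Int) x y z = mspec x y z m := by
      unfold count_max_no_cuts2
      show pvGet (dpA (m : Int) x y z m) ((m : Nat) : Int) = _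
      rw [dpA_inv (m : Int) x y z hn hx hy hz hyx hzy m (le_refl _) m (by omega), if_pos (le_refl _)]
    rw [hA, hB]
    rw [show ((m : Int)).toNat = m by omega]

set_option maxRecDepth 8192 in
theorem count_max_no_cuts2_changed : Claim_changed_count_max_no_cuts2 := by
  unfold Claim_changed_count_max_no_cuts2
  decide
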